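-- pv_equiv track=rewrite | github.com/2021145152/IRMV | pddl/scripts/pddl_writer.py | generate_init_affordances
-- ===== SOURCE A (Python) =====
-- from typing import Dict, List, Any
--
-- def generate_init_affordances(affordances_map: Dict[str, List[str]]) -> List[str]:
--     """
--     Generate affordances section of init.
--
--     Args:
--         affordances_map: Dict mapping artifact_id to affordance instance IDs
--
--     Returns:
--         List of PDDL init statements
--     """
--     lines = []
--
--     lines.append("    ; ====================================================================")
--     lines.append("    ; AFFORDANCES")
--     lines.append("    ; ====================================================================")
--
--     for artifact_id in sorted(affordances_map.keys()):
--         affordances = sorted(affordances_map[artifact_id])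
--         for affordance_id in affordances:
--             lines.append(f"    ({affordance_id} {artifact_id})")
--
--     return lines
-- ===== SOURCE B (Python) =====
-- def generate_init_affordances(affordances_map):
--     header = [
--         "    ; ====================================================================",
--         "    ; AFFORDANCES",
--         "    ; ====================================================================",
--     ]
--     pairs = sorted(
--         (artifact_id, affordance_id)
--         for artifact_id, affordances in affordances_map.items()
--         for affordance_id in affordances
--     )
--     return header + [f"    ({affordance_id} {artifact_id})" for artifact_id, affordance_id in pairs]
-- ===== Notes on version B (the rewrite author's own statement) =====
-- stated objective: alternative
-- what changed: A sorts the keys and then separately sorts each key's affordance list inside a nested loop; B flattens the whole map into one list of (artifact, affordance) tuples, sorts it once lexicographically, and formats each tuple.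
import Mathlib
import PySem

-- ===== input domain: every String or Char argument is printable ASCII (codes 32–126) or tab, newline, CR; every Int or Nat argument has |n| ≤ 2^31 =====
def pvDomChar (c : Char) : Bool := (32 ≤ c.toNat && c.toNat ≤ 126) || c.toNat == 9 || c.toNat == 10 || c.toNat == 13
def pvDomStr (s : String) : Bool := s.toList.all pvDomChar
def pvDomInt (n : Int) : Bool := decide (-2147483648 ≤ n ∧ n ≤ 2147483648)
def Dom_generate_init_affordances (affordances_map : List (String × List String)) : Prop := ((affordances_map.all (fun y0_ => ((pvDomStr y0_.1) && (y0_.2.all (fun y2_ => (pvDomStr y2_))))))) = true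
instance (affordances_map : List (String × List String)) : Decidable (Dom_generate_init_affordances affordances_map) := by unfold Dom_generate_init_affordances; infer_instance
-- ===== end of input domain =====

-- B replaces A's nested key-sort-then-value-sort loops by one flat (artifact, affordance)
-- tuple list sorted once lexicographically (objective: alternative decomposition, same cost).

-- ===== PORT A =====
-- d[artifact_id] is ported as getD with default []: exact, since artifact_id is drawn from d.keys.
def generate_init_affordances (affordances_map : List (String × List String)) : List String :=
  let d := PySem.Dict.mk affordances_map
  let lines : List String := []
  let lines := lines ++ ["    ; ===================================================================="]
  let lines := lines ++ ["    ; AFFORDANCES"]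
  let lines := lines ++ ["    ; ===================================================================="]
  (PySem.List.sorted d.keys (fun k => k) false).foldl
    (fun lines artifact_id =>
      let affordances := PySem.List.sorted (d.getD artifact_id []) (fun a => a) false
      affordances.foldl
        (fun lines affordance_id =>
          lines ++ ["    (" ++ affordance_id ++ " " ++ artifact_id ++ ")"])
        lines)
    lines

-- ===== PORT B =====
def generate_init_affordances_alt (affordances_map : List (String × List String)) : List String :=
  let header : List String :=
    ["    ; ====================================================================",
     "    ; AFFORDANCES",
     "    ; ===================================================================="]
  let pairs := PySem.List.sorted2
    (affordances_map.flatMap (fun kv => kv.2.map (fun affordance_id => (kv.1, affordance_id))))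
    (fun p => p.1) (fun p => p.2) false
  header ++ pairs.map (fun p => "    (" ++ p.2 ++ " " ++ p.1 ++ ")")

-- ===== PRECONDITION & SPEC =====
-- Pre_ excludes association lists with duplicate keys: they cannot arise from a Python dict,
-- whose construction already collapses duplicates before either function runs.
def Pre_generate_init_affordances (affordances_map : List (String × List String)) : Prop :=
  (affordances_map.map Prod.fst).Nodup
instance (affordances_map : List (String × List String)) : Decidable (Pre_generate_init_affordances affordances_map) := by unfold Pre_generate_init_affordances; infer_instance
def pvWitness_generate_init_affordances : (List (String × List String)) := [("a", ["x", "y"]), ("b", ["z"])]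

def Spec_generate_init_affordances (affordances_map : List (String × List String)) (out : List String) : Prop := out = generate_init_affordances_alt affordances_map
instance (affordances_map : List (String × List String)) (out : List String) : Decidable (Spec_generate_init_affordances affordances_map out) := by unfold Spec_generate_init_affordances; infer_instance

-- ===== CLAIM (what is proved, stated in full; the proofs are below) =====
def Claim_equal_generate_init_affordances : Prop := ∀ (affordances_map : List (String × List String)), Dom_generate_init_affordances affordances_map → Pre_generate_init_affordances affordances_map → Spec_generate_init_affordances affordances_map (generate_init_affordances affordances_map)

-- ===== LEMMAS AND PROOFS =====

-- lexicographic ≤ on (String × String), Python's tuple order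
def pvLex (p q : String × String) : Prop := p.1 < q.1 ∨ (p.1 = q.1 ∧ p.2 ≤ q.2)

theorem pvLex_trans (a b c : String × String) (h1 : pvLex a b) (h2 : pvLex b c) : pvLex a c := by
  rcases h1 with h1 | ⟨e1, l1⟩ <;> rcases h2 with h2 | ⟨e2, l2⟩
  · exact Or.inl (lt_trans h1 h2)
  · exact Or.inl (e2 ▸ h1)
  · exact Or.inl (e1 ▸ h2)
  · exact Or.inr ⟨e1.trans e2, le_trans l1 l2⟩

theorem pvLex_antisymm (a b : String × String) (h1 : pvLex a b) (h2 : pvLex b a) : a = b := by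
  rcases h1 with h1 | ⟨e1, l1⟩ <;> rcases h2 with h2 | ⟨e2, l2⟩
  · exact absurd h2 (lt_asymm h1)
  · exact absurd h1 (e2 ▸ lt_irrefl _)
  · exact absurd h2 (e1 ▸ lt_irrefl _)
  · exact Prod.ext e1 (le_antisymm l1 l2)

theorem pairwise_insertBy {α : Type} (R : α → α → Prop)
    (htrans : ∀ a b c, R a b → R b c → R a c)
    (before : α → α → Bool)
    (hT : ∀ a b, before a b = true → R a b)
    (hF : ∀ a b, before a b = false → R b a)
    (x : α) (l : List α) (hl : l.Pairwise R) :
    (PySem.List.insertBy before x l).Pairwise R := by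
  induction l with
  | nil => simp [PySem.List.insertBy]
  | cons y ys ih =>
    rw [List.pairwise_cons] at hl
    obtain ⟨hy, hys⟩ := hl
    by_cases hb : before x y = true
    · simp only [PySem.List.insertBy, hb, if_true]
      refine List.Pairwise.cons ?_ (List.Pairwise.cons hy hys)
      intro z hz
      rcases List.mem_cons.mp hz with rfl | hz
      · exact hT x z hb
      · exact htrans x y z (hT x y hb) (hy z hz)
    · rw [Bool.not_eq_true] at hb
      simp only [PySem.List.insertBy, hb]
      refine List.Pairwise.cons ?_ (ih hys)
      intro z hz
      rcases (PySem.List.mem_insertBy before x z ys).mp hz with rfl | hz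
      · exact hF z y hb
      · exact hy z hz

theorem pairwise_foldl_insertBy {α : Type} (R : α → α → Prop)
    (htrans : ∀ a b c, R a b → R b c → R a c)
    (before : α → α → Bool)
    (hT : ∀ a b, before a b = true → R a b)
    (hF : ∀ a b, before a b = false → R b a)
    (xs acc : List α) (hacc : acc.Pairwise R) :
    (xs.foldl (fun acc x => PySem.List.insertBy before x acc) acc).Pairwise R := by
  induction xs generalizing acc with
  | nil => exact hacc
  | cons x xs ih =>
    exact ih _ (pairwise_insertBy R htrans before hT hF x acc hacc)

theorem sorted2_pairs_pairwise (xs : List (String × String)) :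
    (PySem.List.sorted2 xs (fun p => p.1) (fun p => p.2) false).Pairwise pvLex := by
  simp only [PySem.List.sorted2, if_neg (by decide : ¬ (false = true))]
  apply pairwise_foldl_insertBy pvLex pvLex_trans
  · intro a b h
    by_cases hab : a.1 < b.1
    · exact Or.inl hab
    · simp only [Bool.or_eq_true, Bool.and_eq_true, Bool.not_eq_eq_eq_not, Bool.not_true,
        decide_eq_true_eq, decide_eq_false_iff_not] at h
      rcases h with h | ⟨hba, h2⟩
      · exact absurd h hab
      · exact Or.inr ⟨le_antisymm (not_lt.mp hba) (not_lt.mp hab), le_of_lt h2⟩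
  · intro a b h
    by_cases hba : b.1 < a.1
    · exact Or.inl hba
    · by_cases hab : a.1 < b.1
      · exact absurd h (by simp [hab])
      · by_cases h2 : a.2 < b.2
        · exact absurd h (by simp [hab, hba, h2])
        · exact Or.inr ⟨le_antisymm (not_lt.mp hab) (not_lt.mp hba), not_lt.mp h2⟩
  · exact List.Pairwise.nil

theorem getD_of_mem_nodup (m : List (String × List String))
    (hnd : (m.map Prod.fst).Nodup) (kv : String × List String) (hmem : kv ∈ m) :
    (PySem.Dict.mk m).getD kv.1 [] = kv.2 := by
  induction m with
  | nil => cases hmem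
  | cons hd tl ih =>
    simp only [List.map_cons, List.nodup_cons] at hnd
    rcases List.mem_cons.mp hmem with rfl | hmem
    · simp [PySem.Dict.getD, PySem.Dict.get?, List.find?]
    · have hne : (hd.1 == kv.1) = false := by
        simp only [beq_eq_false_iff_ne, ne_eq]
        intro he
        exact hnd.1 (he ▸ List.mem_map_of_mem hmem)
      have := ih hnd.2 hmem
      simpa [PySem.Dict.getD, PySem.Dict.get?, PySem.Dict.mk, List.find?, hne] using this

theorem key_eq_of_mem_block (k : String) (vs : List String) (p : String × String)
    (hp : p ∈ vs.map (fun a => (k, a))) : p.1 = k := by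
  simp only [List.mem_map] at hp
  obtain ⟨a, _, rfl⟩ := hp
  rfl

theorem pairwise_flatMap_blocks (l : List String) (hl : l.Pairwise (· < ·))
    (f : String → List (String × String))
    (hfst : ∀ k, ∀ p ∈ f k, p.1 = k)
    (hin : ∀ k, (f k).Pairwise pvLex) :
    (l.flatMap f).Pairwise pvLex := by
  induction l with
  | nil => simp
  | cons k ks ih =>
    rw [List.pairwise_cons] at hl
    rw [List.flatMap_cons, List.pairwise_append]
    refine ⟨hin k, ih hl.2, ?_⟩
    intro p hp q hq
    rw [List.mem_flatMap] at hq
    obtain ⟨k', hk', hq⟩ := hq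
    exact Or.inl ((hfst k p hp) ▸ (hfst k' q hq) ▸ hl.1 k' hk')

theorem main_pairs_eq (m : List (String × List String))
    (hnd : (m.map Prod.fst).Nodup) :
    PySem.List.sorted2 (m.flatMap (fun kv => kv.2.map (fun a => (kv.1, a))))
      (fun p => p.1) (fun p => p.2) false
    = (PySem.List.sorted (PySem.Dict.mk m).keys (fun k => k) false).flatMap
        (fun k => (PySem.List.sorted ((PySem.Dict.mk m).getD k []) (fun a => a) false).map
          (fun a => (k, a))) := by
  have hk : (PySem.Dict.mk m).keys = m.map Prod.fst := rfl
  apply List.Perm.eq_of_pairwise (le := pvLex)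
  · exact fun a b _ _ h1 h2 => pvLex_antisymm a b h1 h2
  · exact sorted2_pairs_pairwise _
  · -- the right-hand side is lexicographically pairwise-sorted
    apply pairwise_flatMap_blocks
    · have hnd' : (PySem.List.sorted (PySem.Dict.mk m).keys (fun k => k) false).Nodup :=
        (PySem.List.sorted_perm (PySem.Dict.mk m).keys (fun k => k) false).symm.nodup (hk ▸ hnd)
      have hle := PySem.List.sorted_pairwise (PySem.Dict.mk m).keys (fun k => k)
      exact (hle.and hnd').imp (fun h => lt_of_le_of_ne h.1 h.2)
    · exact fun k p hp => key_eq_of_mem_block k _ p hp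
    · intro k
      rw [List.pairwise_map]
      exact (PySem.List.sorted_pairwise _ _).imp (fun h => Or.inr ⟨rfl, h⟩)
  · -- both sides are permutations of the flat pair list
    refine (PySem.List.sorted2_perm _ _ _ _).trans (List.Perm.symm ?_)
    have h1 : ((PySem.List.sorted (PySem.Dict.mk m).keys (fun k => k) false).flatMap
        (fun k => (PySem.List.sorted ((PySem.Dict.mk m).getD k []) (fun a => a) false).map
          (fun a => (k, a)))).Perm
        ((PySem.Dict.mk m).keys.flatMap (fun k => ((PySem.Dict.mk m).getD k []).map (fun a => (k, a)))) :=
      List.Perm.flatMap (PySem.List.sorted_perm _ _ _)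
        (fun k _ => (PySem.List.sorted_perm _ _ _).map _)
    refine h1.trans (List.Perm.of_eq ?_)
    rw [hk, List.flatMap_map]
    exact List.flatMap_congr (fun kv hmem => by rw [getD_of_mem_nodup m hnd kv hmem])

-- ===== VERDICT (by name: the statement is the Claim_ definition above) =====
theorem generate_init_affordances_spec : Claim_equal_generate_init_affordances := by
  intro m _ hpre
  unfold Spec_generate_init_affordances
  show generate_init_affordances m = generate_init_affordances_alt m
  simp only [generate_init_affordances, generate_init_affordances_alt,
    PySem.List.foldl_append_singleton_eq_map, PySem.List.foldl_append_eq_flatMap,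
    List.nil_append]
  rw [main_pairs_eq m hpre]
  simp only [List.map_flatMap, List.map_map, Function.comp_def]
  rfl
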